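-- pv_equiv track=rewrite | github.com/brenoASantana/uerj | maratona_18_semana_ime/estocolmo.py | widest_path_min_over_all
-- ===== SOURCE A (Python) =====
-- import heapq
--
-- def widest_path_min_over_all(n, adj):
--     """
--     Calcula o widest path (maior gargalo) de 1 até cada nó, e retorna
--     o mínimo desses valores para nós 2..n. Se algum for inalcançável, retorna 0.
--     """
--     if n == 1:
--         return 0  # não há outras ilhas a alcançar
--
--     # best[i] = melhor gargalo de 1 até i
--     best = [-1] * (n + 1)
--     best[1] = 10**18  # "infinito" suficiente
--
--     # heap de máximos usando valores negativos (heapq é min-heap)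
--     heap = [(-best[1], 1)]
--
--     while heap:
--         neg_val, u = heapq.heappop(heap)
--         val = -neg_val
--         if val < best[u]:
--             continue  # já temos algo melhor
--
--         for v, c in adj[u]:
--             cand = val if val < c else c  # min(val, c) sem chamada de função
--             if cand > best[v]:
--                 best[v] = cand
--                 heapq.heappush(heap, (-cand, v))
--
--     # Agrega a resposta: mínimo entre best[2..n]; se algum == -1, inalcançável -> 0
--     ans = best[2]
--     if ans == -1:
--         return 0
--     for i in range(3, n + 1):
--         if best[i] == -1:
--             return 0
--         if best[i] < ans:
--             ans = best[i]
--     return ans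
-- ===== SOURCE B (Python) =====
-- def widest_path_min_over_all(n, adj):
--     """Round-based relaxation sweeps to a fixpoint (Bellman-Ford style) instead of a
--     heap-based Dijkstra: repeatedly sweep nodes 1..n, relaxing only the edges of nodes
--     already reached (so unreachable parts of the graph are never touched, as in A),
--     until a full sweep changes nothing; then aggregate with min()."""
--     if n == 1:
--         return 0
--     best = [-1] * (n + 1)
--     best[1] = 10**18
--     changed = True
--     while changed:
--         changed = False
--         for u in range(1, n + 1):
--             bu = best[u]
--             if bu == -1:
--                 continue
--             for v, c in adj[u]:
--                 cand = bu if bu < c else c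
--                 if cand > best[v]:
--                     best[v] = cand
--                     changed = True
--     m = min(best[2:])
--     return 0 if m == -1 else m
-- ===== Notes on version B (the rewrite author's own statement) =====
-- stated objective: alternative
-- what changed: Replaces the heap-based max-Dijkstra (priority queue of negated bottlenecks with lazy deletion) by round-based relaxation sweeps over the already-reached nodes until a full sweep changes nothing, and replaces the early-return aggregation loop by a single min() over best[2:]; …
-- outside the precondition, e.g. on widest_path_min_over_all(3, {1: [(-1, 5)], -1: [(2, 7)], 2: [], 3: []}): A returns 5, B returns 0; on widest_path_min_over_all(3, {1: [], 2: [(9, 1)], 3: []}): A returns 0, B returns 0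
import Mathlib
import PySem

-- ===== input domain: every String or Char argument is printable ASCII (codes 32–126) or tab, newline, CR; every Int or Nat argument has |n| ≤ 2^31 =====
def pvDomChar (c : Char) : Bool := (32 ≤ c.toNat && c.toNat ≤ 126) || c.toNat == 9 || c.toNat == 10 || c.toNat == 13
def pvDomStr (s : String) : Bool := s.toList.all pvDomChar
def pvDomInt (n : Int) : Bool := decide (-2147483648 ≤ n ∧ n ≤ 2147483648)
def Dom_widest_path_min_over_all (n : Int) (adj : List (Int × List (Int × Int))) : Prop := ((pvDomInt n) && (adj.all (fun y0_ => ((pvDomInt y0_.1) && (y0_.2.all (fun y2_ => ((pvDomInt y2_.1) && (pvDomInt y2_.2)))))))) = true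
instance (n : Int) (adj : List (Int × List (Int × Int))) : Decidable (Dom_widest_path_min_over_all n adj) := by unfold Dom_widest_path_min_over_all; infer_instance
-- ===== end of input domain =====

-- One honest line: B swaps A's heap-based max-Dijkstra for round-based relaxation sweeps over
-- the already-reached nodes to a fixpoint, plus a single min() aggregation; same value on Pre_.

-- ===== shared small helpers (Python list indexing / dict lookup, used by both ports) =====

-- Python best[i] read (indices are in range under Pre_; wraparound inputs are excluded there)
def pvGetI (l : List Int) (i : Int) : Int := PySem.List.pyGetD l i 0
-- Python best[i] = x assignment (in range under Pre_)
def pvSetI (l : List Int) (i : Int) (x : Int) : List Int := PySem.List.pySetD l i x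
-- adj[u] in both ports (KeyError = none; Pre_ keeps every key either port reaches present)
def pvLookup (adj : List (Int × List (Int × Int))) (u : Int) : List (Int × Int) :=
  (PySem.Dict.get? (PySem.Dict.mk adj) u).getD []
-- all capacities of the graph plus the "infinity" 10^18; only used to size the fuel of the loops
def pvCaps (adj : List (Int × List (Int × Int))) : List Int :=
  1000000000000000000 :: adj.flatMap (fun p => p.2.map (fun e => e.2))
-- fuel provably larger than the number of loop iterations (see the potential lemmas below)
def pvFuel (n : Int) (adj : List (Int × List (Int × Int))) : Nat :=
  (n.toNat + 2) * (pvCaps adj).length + 2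

-- ===== PORT A =====

-- heapq.heappop on the multiset of (negated value, node) pairs: removes the lexicographically
-- least pair (exact: heap entries are compared as tuples, and equal tuples are interchangeable)
def pvPopMin : List (Int × Int) → Option ((Int × Int) × List (Int × Int))
  | [] => none
  | x :: xs =>
    match pvPopMin xs with
    | none => some (x, [])
    | some (m, rest) =>
      if x.1 < m.1 || (x.1 == m.1 && x.2 ≤ m.2) then some (x, xs) else some (m, x :: rest)

-- body of A's inner `for v, c in adj[u]` loop; heappush modeled as multiset insertion (append)
def pvStepA (val : Int) (st : List Int × List (Int × Int)) (e : Int × Int) :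
    List Int × List (Int × Int) :=
  let cand := if val < e.2 then val else e.2
  if cand > pvGetI st.1 e.1 then (pvSetI st.1 e.1 cand, st.2 ++ [(-cand, e.1)]) else st

-- A's `while heap:` loop (fuel is provably sufficient: the loop always drains the heap)
def pvLoopA (adj : List (Int × List (Int × Int))) :
    Nat → List Int → List (Int × Int) → List Int
  | 0, best, _ => best
  | fuel + 1, best, heap =>
    match pvPopMin heap with
    | none => best
    | some (m, rest) =>
      let val := -m.1
      if val < pvGetI best m.2 then pvLoopA adj fuel best rest
      else
        let st := (pvLookup adj m.2).foldl (pvStepA val) (best, rest)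
        pvLoopA adj fuel st.1 st.2

-- A's aggregation loop `for i in range(3, n + 1):` with its early `return 0`
def pvAggA (best : List Int) : List Int → Int → Int
  | [], ans => ans
  | i :: rest, ans =>
    if pvGetI best i = -1 then 0
    else pvAggA best rest (if pvGetI best i < ans then pvGetI best i else ans)

def widest_path_min_over_all (n : Int) (adj : List (Int × List (Int × Int))) : Int :=
  if n = 1 then 0
  else
    let best0 := pvSetI (List.replicate (n + 1).toNat (-1)) 1 1000000000000000000
    let heap0 := [(-pvGetI best0 1, 1)]
    let best := pvLoopA adj (pvFuel n adj) best0 heap0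
    let ans := pvGetI best 2
    if ans = -1 then 0 else pvAggA best (PySem.List.pyRange 3 (n + 1) 1) ans

-- ===== PORT B =====

-- body of B's inner `for v, c in adj[u]` loop; `bu` is the snapshot best[u]
def pvStepB (bu : Int) (b : List Int) (e : Int × Int) : List Int :=
  let cand := if bu < e.2 then bu else e.2
  if cand > pvGetI b e.1 then pvSetI b e.1 cand else b

-- one full sweep `for u in range(1, n + 1): ...` with B's `if bu == -1: continue` guard
def pvRoundB (n : Int) (adj : List (Int × List (Int × Int))) (b : List Int) : List Int :=
  (PySem.List.pyRange 1 (n + 1) 1).foldl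
    (fun b u =>
      let bu := pvGetI b u
      if bu = -1 then b
      else (pvLookup adj u).foldl (fun b e => pvStepB bu b e) b) b

-- B's `while changed:` loop; `changed` is False exactly when the sweep left `best` unchanged
-- (every in-place write strictly increases an entry); fuel is provably sufficient
def pvLoopB (n : Int) (adj : List (Int × List (Int × Int))) : Nat → List Int → List Int
  | 0, b => b
  | fuel + 1, b =>
    let b' := pvRoundB n adj b
    if b' = b then b else pvLoopB n adj fuel b'

def widest_path_min_over_all_alt (n : Int) (adj : List (Int × List (Int × Int))) : Int :=
  if n = 1 then 0
  else
    let best := pvLoopB n adj (pvFuel n adj)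
      (pvSetI (List.replicate (n + 1).toNat (-1)) 1 1000000000000000000)
    -- min(best[2:]); the slice is nonempty since n ≥ 2 (Python min would raise on [])
    match PySem.List.min? (PySem.List.slice best (some 2) none) (fun x => x) with
    | none => 0
    | some m => if m = -1 then 0 else m

-- ===== PRECONDITION & SPEC =====
-- Pre_ keeps n = 1 and the graphs where node 1 is a key and every edge listed under a key in
-- 1..n targets a present key in 1..n.  Elsewhere A raises (KeyError on a missing key it
-- reaches, IndexError on a target beyond the best list), or returns a value produced by
-- Python negative-index wraparound on the best list, or — only when the malformed edges sit
-- on unreachable nodes — returns the same value B also returns (a conservative exclusion,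
-- cited in the claim).
def Pre_widest_path_min_over_all (n : Int) (adj : List (Int × List (Int × Int))) : Prop :=
  n = 1 ∨ (2 ≤ n ∧
    ((PySem.Dict.mk adj).contains 1
      && adj.all (fun p => !(decide (1 ≤ p.1) && decide (p.1 ≤ n))
            || p.2.all (fun e => decide (1 ≤ e.1) && decide (e.1 ≤ n)
                  && (PySem.Dict.mk adj).contains e.1))) = true)
instance (n : Int) (adj : List (Int × List (Int × Int))) :
    Decidable (Pre_widest_path_min_over_all n adj) := by
  unfold Pre_widest_path_min_over_all; infer_instance

def pvWitness_widest_path_min_over_all : Int × (List (Int × List (Int × Int))) :=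
  (2, [(1, [(2, 5)]), (2, [])])

def Spec_widest_path_min_over_all (n : Int) (adj : List (Int × List (Int × Int))) (out : Int) : Prop :=
  out = widest_path_min_over_all_alt n adj
instance (n : Int) (adj : List (Int × List (Int × Int))) (out : Int) :
    Decidable (Spec_widest_path_min_over_all n adj out) := by
  unfold Spec_widest_path_min_over_all; infer_instance

-- ===== CLAIM (what is proved, stated in full; the proofs are below) =====
def Claim_equal_widest_path_min_over_all : Prop :=
  ∀ (n : Int) (adj : List (Int × List (Int × Int))),
    Dom_widest_path_min_over_all n adj → Pre_widest_path_min_over_all n adj →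
    Spec_widest_path_min_over_all n adj (widest_path_min_over_all n adj)

-- ===== LEMMAS AND PROOFS =====


-- ---------- basic bridges ----------

theorem pv_min_ite (a b : Int) : (if a < b then a else b) = min a b := by
  split_ifs <;> omega

theorem pvGetI_eq (l : List Int) (i : Int) (h : 0 ≤ i) : pvGetI l i = l.getD i.toNat 0 := by
  obtain ⟨m, rfl⟩ := Int.eq_ofNat_of_zero_le h
  simp [pvGetI]

theorem pvSetI_eq (l : List Int) (i : Int) (x : Int) (h : 0 ≤ i) :
    pvSetI l i x = l.set i.toNat x := by
  simp [pvSetI, PySem.List.pySetD_of_nonneg _ _ h]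

theorem pv_getD_set_self (l : List Int) (i : Nat) (x : Int) (h : i < l.length) :
    (l.set i x).getD i 0 = x := by
  simp [List.getD, h]

theorem pv_getD_eq_getElem (l : List Int) (j : Nat) (h : j < l.length) :
    l.getD j 0 = l[j] := by
  simp [List.getD, List.getElem?_eq_getElem h]

theorem pv_mem_getD (l : List Int) (x : Int) (hx : x ∈ l) :
    ∃ j, j < l.length ∧ l.getD j 0 = x := by
  obtain ⟨j, hj, rfl⟩ := List.mem_iff_getElem.1 hx
  exact ⟨j, hj, pv_getD_eq_getElem _ _ hj⟩

-- pointwise order on best arrays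
def PLe (a b : List Int) : Prop := a.length = b.length ∧ ∀ j, a.getD j 0 ≤ b.getD j 0

theorem PLe.refl' (a : List Int) : PLe a a := ⟨rfl, fun _ => le_refl _⟩

theorem PLe.trans' {a b c : List Int} (h1 : PLe a b) (h2 : PLe b c) : PLe a c :=
  ⟨h1.1.trans h2.1, fun j => (h1.2 j).trans (h2.2 j)⟩

theorem PLe.antisymm' {a b : List Int} (h1 : PLe a b) (h2 : PLe b a) : a = b := by
  apply List.ext_getElem h1.1
  intro i hi hi'
  have := (h1.2 i).antisymm (h2.2 i)
  rwa [pv_getD_eq_getElem _ _ hi, pv_getD_eq_getElem _ _ hi'] at this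

-- ---------- pvPopMin ----------

theorem pvPopMin_none_iff (l : List (Int × Int)) : pvPopMin l = none ↔ l = [] := by
  cases l with
  | nil => simp [pvPopMin]
  | cons x xs =>
    simp only [pvPopMin]
    cases h : pvPopMin xs with
    | none => simp
    | some p => obtain ⟨m, rest⟩ := p; simp only []; split <;> simp

theorem pvPopMin_perm (l : List (Int × Int)) (m : Int × Int) (rest : List (Int × Int))
    (h : pvPopMin l = some (m, rest)) : l.Perm (m :: rest) := by
  induction l generalizing m rest with
  | nil => simp [pvPopMin] at h
  | cons x xs ih =>
    simp only [pvPopMin] at h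
    cases h' : pvPopMin xs with
    | none =>
      rw [h'] at h
      have hxs : xs = [] := (pvPopMin_none_iff xs).1 h'
      simp only [Option.some.injEq, Prod.mk.injEq] at h
      subst hxs
      simp [← h.1, ← h.2]
    | some p =>
      obtain ⟨m', rest'⟩ := p
      rw [h'] at h
      simp only [] at h
      split at h
      · simp only [Option.some.injEq, Prod.mk.injEq] at h
        rw [← h.1, ← h.2]
      · simp only [Option.some.injEq, Prod.mk.injEq] at h
        obtain ⟨rfl, rfl⟩ := h
        exact ((ih _ _ h').cons x).trans (List.Perm.swap _ _ _)

theorem pvPopMin_mem (l : List (Int × Int)) (m : Int × Int) (rest : List (Int × Int))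
    (h : pvPopMin l = some (m, rest)) : ∀ e ∈ m :: rest, e ∈ l :=
  fun _e he => (pvPopMin_perm l m rest h).symm.subset he

theorem pvPopMin_length (l : List (Int × Int)) (m : Int × Int) (rest : List (Int × Int))
    (h : pvPopMin l = some (m, rest)) : l.length = rest.length + 1 := by
  simpa using (pvPopMin_perm l m rest h).length_eq

-- ---------- pvLookup ----------

theorem pvLookup_cases (adj : List (Int × List (Int × Int))) (u : Int) :
    pvLookup adj u = [] ∨ ∃ p ∈ adj, p.1 = u ∧ p.2 = pvLookup adj u := by
  induction adj with
  | nil => left; simp [pvLookup, PySem.Dict.get?]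
  | cons q t ih =>
    obtain ⟨k, es⟩ := q
    by_cases h : k = u
    · right
      refine ⟨(k, es), List.mem_cons_self, h, ?_⟩
      simp [pvLookup, PySem.Dict.get?_mk_cons, h]
    · have : pvLookup ((k, es) :: t) u = pvLookup t u := by
        simp [pvLookup, PySem.Dict.get?_mk_cons, h]
      rw [this]
      rcases ih with h' | ⟨p, hp, hp1, hp2⟩
      · left; exact h'
      · right; exact ⟨p, List.mem_cons_of_mem _ hp, hp1, hp2⟩

theorem pvCaps_mem (adj : List (Int × List (Int × Int))) (u : Int) (e : Int × Int)
    (he : e ∈ pvLookup adj u) : e.2 ∈ pvCaps adj := by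
  rcases pvLookup_cases adj u with h | ⟨p, hp, _hp1, hp2⟩
  · rw [h] at he; simp at he
  · rw [← hp2] at he
    simp only [pvCaps, List.mem_cons]
    right
    exact List.mem_flatMap.2 ⟨p, hp, List.mem_map.2 ⟨e, he, rfl⟩⟩

theorem pvCaps_inf (adj : List (Int × List (Int × Int))) :
    (1000000000000000000 : Int) ∈ pvCaps adj := List.mem_cons_self

-- ---------- rank / potential ----------

def pvRank (S : List Int) (x : Int) : Nat := S.countP (fun s => decide (s ≤ x))

theorem pvRank_le (S : List Int) (x : Int) : pvRank S x ≤ S.length :=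
  List.countP_le_length

theorem pvRank_mono (S : List Int) {x y : Int} (h : x ≤ y) : pvRank S x ≤ pvRank S y := by
  apply List.countP_mono_left
  intro a _ ha
  simp only [decide_eq_true_eq] at *
  omega

theorem pvRank_lt (S : List Int) {x y : Int} (h : x < y) (hy : y ∈ S) :
    pvRank S x < pvRank S y := by
  induction S with
  | nil => simp at hy
  | cons s t ih =>
    have hmono : pvRank t x ≤ pvRank t y := pvRank_mono t (le_of_lt h)
    simp only [pvRank, List.countP_cons] at hmono ⊢
    by_cases hys : y = s
    · have h1 : (decide (s ≤ x)) = false := by subst hys; simp; omega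
      have h2 : (decide (s ≤ y)) = true := by subst hys; simp
      rw [h1, h2]; simp; omega
    · have hy' : y ∈ t := by
        rcases List.mem_cons.1 hy with h' | h'
        · exact absurd h' hys
        · exact h'
      have hiht := ih hy'
      simp only [pvRank] at hiht
      have h3 : (decide (s ≤ x)) = true → (decide (s ≤ y)) = true := by simp; omega
      rcases Bool.eq_false_or_eq_true (decide (s ≤ x)) with h4 | h4 <;>
        rcases Bool.eq_false_or_eq_true (decide (s ≤ y)) with h5 | h5 <;>
          rw [h4, h5] <;> simp_all

def pvSum (S : List Int) (len : Nat) (b : List Int) : Nat :=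
  ∑ j ∈ Finset.range len, (S.length - pvRank S (b.getD j 0))

theorem pvSum_le (S : List Int) (len : Nat) (b : List Int) : pvSum S len b ≤ len * S.length := by
  calc pvSum S len b ≤ ∑ _j ∈ Finset.range len, S.length :=
        Finset.sum_le_sum (fun j _ => Nat.sub_le _ _)
    _ = len * S.length := by simp [Finset.sum_const, Finset.card_range]

theorem pvSum_strict (S : List Int) (len : Nat) {a b : List Int}
    (h : ∀ j, a.getD j 0 ≤ b.getD j 0) (j0 : Nat) (hj0 : j0 < len)
    (hstrict : a.getD j0 0 < b.getD j0 0) (hmem : b.getD j0 0 ∈ S) :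
    pvSum S len b < pvSum S len a := by
  apply Finset.sum_lt_sum
  · intro j _
    have := pvRank_mono S (h j)
    omega
  · refine ⟨j0, Finset.mem_range.2 hj0, ?_⟩
    have h1 := pvRank_lt S hstrict hmem
    have h2 := pvRank_le S (b.getD j0 0)
    omega


-- ---------- fixpoint predicates ----------

-- every edge of every node 1..n is relaxed in q
def pvClosed (n : Int) (adj : List (Int × List (Int × Int))) (q : List Int) : Prop :=
  ∀ u : Int, 1 ≤ u → u ≤ n → ∀ e ∈ pvLookup adj u,
    min (q.getD u.toNat 0) e.2 ≤ q.getD e.1.toNat 0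

-- A's per-node invariant: untouched, or its current value is still on the heap, or relaxed
def pvNode (adj : List (Int × List (Int × Int))) (b : List Int) (h : List (Int × Int))
    (w : Int) : Prop :=
  b.getD w.toNat 0 = -1
  ∨ (∃ e ∈ h, e.2 = w ∧ -e.1 = b.getD w.toNat 0)
  ∨ (∀ e ∈ pvLookup adj w, min (b.getD w.toNat 0) e.2 ≤ b.getD e.1.toNat 0)

-- ---------- generic getD/set and foldl helpers ----------

theorem pv_getD_set (l : List Int) (i j : Nat) (x : Int) :
    (l.set i x).getD j 0 = if i = j ∧ i < l.length then x else l.getD j 0 := by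
  by_cases hij : i = j
  · subst hij
    by_cases hl : i < l.length
    · simp [hl]
    · simp only [hl, and_false, if_false]
      rw [List.set_eq_of_length_le (by omega)]
  · simp [hij]

theorem pv_foldl_pres {α β : Type} (P : α → Prop) (l : List β) (g : α → β → α) (s : α)
    (hstep : ∀ s x, x ∈ l → P s → P (g s x)) (h0 : P s) : P (l.foldl g s) := by
  induction l generalizing s with
  | nil => exact h0
  | cons x t ih =>
    exact ih _ (fun s' y hy hP => hstep s' y (List.mem_cons_of_mem _ hy) hP)
      (hstep s x List.mem_cons_self h0)

-- step normal forms
theorem pvStepA_eq (val : Int) (st : List Int × List (Int × Int)) (e : Int × Int)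
    (h1 : 0 ≤ e.1) :
    pvStepA val st e =
      if st.1.getD e.1.toNat 0 < min val e.2
      then (st.1.set e.1.toNat (min val e.2), st.2 ++ [(-(min val e.2), e.1)]) else st := by
  simp only [pvStepA, pv_min_ite, pvGetI_eq _ _ h1, pvSetI_eq _ _ _ h1, gt_iff_lt]

theorem pvStepB_eq (bu : Int) (b : List Int) (e : Int × Int) (h1 : 0 ≤ e.1) :
    pvStepB bu b e =
      if b.getD e.1.toNat 0 < min bu e.2
      then b.set e.1.toNat (min bu e.2) else b := by
  simp only [pvStepB, pv_min_ite, pvGetI_eq _ _ h1, pvSetI_eq _ _ _ h1, gt_iff_lt]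

-- ---------- soundness: both loops stay below any closed point ----------

theorem pvRelaxA_le (n : Int) (q : List Int) (val : Int)
    (edges : List (Int × Int)) (st : List Int × List (Int × Int))
    (hedges : ∀ e ∈ edges, (1 ≤ e.1 ∧ e.1 ≤ n) ∧ min val e.2 ≤ q.getD e.1.toNat 0)
    (hlen : st.1.length = (n + 1).toNat)
    (hle : ∀ j, st.1.getD j 0 ≤ q.getD j 0)
    (hheap : ∀ e ∈ st.2, -e.1 ≤ st.1.getD e.2.toNat 0 ∧ 1 ≤ e.2 ∧ e.2 ≤ n) :
    (edges.foldl (pvStepA val) st).1.length = (n + 1).toNat ∧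
    (∀ j, (edges.foldl (pvStepA val) st).1.getD j 0 ≤ q.getD j 0) ∧
    (∀ e ∈ (edges.foldl (pvStepA val) st).2,
      -e.1 ≤ (edges.foldl (pvStepA val) st).1.getD e.2.toNat 0 ∧ 1 ≤ e.2 ∧ e.2 ≤ n) := by
  induction edges generalizing st with
  | nil => exact ⟨hlen, hle, hheap⟩
  | cons e t ih =>
    obtain ⟨⟨he1, he2⟩, heq⟩ := hedges e List.mem_cons_self
    have htl : ∀ e' ∈ t, (1 ≤ e'.1 ∧ e'.1 ≤ n) ∧ min val e'.2 ≤ q.getD e'.1.toNat 0 :=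
      fun e' he' => hedges e' (List.mem_cons_of_mem _ he')
    rw [List.foldl_cons, pvStepA_eq val st e (by omega)]
    split
    · rename_i hup
      have hlt : e.1.toNat < st.1.length := by rw [hlen]; omega
      apply ih _ htl
      · simpa using hlen
      · intro j
        rw [pv_getD_set]
        split
        · rename_i hcond; rw [← hcond.1]; exact heq
        · exact hle j
      · intro e' he'
        rcases List.mem_append.1 he' with h' | h'
        · obtain ⟨hb, hbnd⟩ := hheap e' h'
          refine ⟨?_, hbnd⟩
          rw [pv_getD_set]
          split
          · rename_i hc; rw [← hc.1] at hb; omega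
          · exact hb
        · simp only [List.mem_singleton] at h'
          subst h'
          simp only [neg_neg]
          rw [pv_getD_set]
          simp [hlt, he1, he2]
    · exact ih _ htl hlen hle hheap

theorem pvLoopA_le (n : Int) (adj : List (Int × List (Int × Int))) (q : List Int)
    (hq : pvClosed n adj q)
    (htgt : ∀ u : Int, 1 ≤ u → u ≤ n → ∀ e ∈ pvLookup adj u, 1 ≤ e.1 ∧ e.1 ≤ n) :
    ∀ (fuel : Nat) (best : List Int) (heap : List (Int × Int)),
    best.length = (n + 1).toNat →
    (∀ j, best.getD j 0 ≤ q.getD j 0) →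
    (∀ e ∈ heap, -e.1 ≤ best.getD e.2.toNat 0 ∧ 1 ≤ e.2 ∧ e.2 ≤ n) →
    ∀ j, (pvLoopA adj fuel best heap).getD j 0 ≤ q.getD j 0 := by
  intro fuel
  induction fuel with
  | zero => intro best heap _ hle _ j; exact hle j
  | succ f ih =>
    intro best heap hlen hle hheap j
    rw [pvLoopA]
    cases hpop : pvPopMin heap with
    | none => exact hle j
    | some p =>
      obtain ⟨m, rest⟩ := p
      have hmem := pvPopMin_mem heap m rest hpop
      obtain ⟨hmb, hm1, hm2⟩ := hheap m (hmem m List.mem_cons_self)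
      have hrest : ∀ e ∈ rest, -e.1 ≤ best.getD e.2.toNat 0 ∧ 1 ≤ e.2 ∧ e.2 ≤ n :=
        fun e he => hheap e (hmem e (List.mem_cons_of_mem _ he))
      simp only []
      split
      · exact ih best rest hlen hle hrest j
      · have hvq : -m.1 ≤ q.getD m.2.toNat 0 := le_trans hmb (hle m.2.toNat)
        have hedges : ∀ e ∈ pvLookup adj m.2,
            (1 ≤ e.1 ∧ e.1 ≤ n) ∧ min (-m.1) e.2 ≤ q.getD e.1.toNat 0 := by
          intro e he
          refine ⟨htgt m.2 hm1 hm2 e he, ?_⟩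
          calc min (-m.1) e.2 ≤ min (q.getD m.2.toNat 0) e.2 :=
                min_le_min hvq (le_refl e.2)
            _ ≤ q.getD e.1.toNat 0 := hq m.2 hm1 hm2 e he
        obtain ⟨hl', hq', hh'⟩ := pvRelaxA_le n q (-m.1) (pvLookup adj m.2) (best, rest)
          hedges hlen hle hrest
        exact ih _ _ hl' hq' hh' j

theorem pvRoundB_le (n : Int) (adj : List (Int × List (Int × Int))) (q : List Int)
    (hq : pvClosed n adj q)
    (htgt : ∀ u : Int, 1 ≤ u → u ≤ n → ∀ e ∈ pvLookup adj u, 1 ≤ e.1 ∧ e.1 ≤ n)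
    (b : List Int) (hle : ∀ j, b.getD j 0 ≤ q.getD j 0) :
    ∀ j, (pvRoundB n adj b).getD j 0 ≤ q.getD j 0 := by
  have hstep : ∀ (s : List Int) (u : Int), u ∈ PySem.List.pyRange 1 (n + 1) 1 →
      (∀ j, s.getD j 0 ≤ q.getD j 0) →
      ∀ j, ((fun (b : List Int) (u : Int) =>
        let bu := pvGetI b u
        if bu = -1 then b
        else (pvLookup adj u).foldl (fun b e => pvStepB bu b e) b) s u).getD j 0
        ≤ q.getD j 0 := by
    intro s u hu hs
    have hu' : 1 ≤ u ∧ u < n + 1 := (PySem.List.mem_pyRange_one).1 hu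
    simp only []
    split
    · exact hs
    · have hbu : pvGetI s u ≤ q.getD u.toNat 0 := by
        rw [pvGetI_eq s u (by omega)]; exact hs u.toNat
      have hstep2 : ∀ (s' : List Int) (e : Int × Int), e ∈ pvLookup adj u →
          (∀ j, s'.getD j 0 ≤ q.getD j 0) →
          ∀ j, (pvStepB (pvGetI s u) s' e).getD j 0 ≤ q.getD j 0 := by
        intro s' e he hs' j
        obtain ⟨he1, he2⟩ := htgt u hu'.1 (by omega) e he
        rw [pvStepB_eq _ s' e (by omega)]
        split
        · rw [pv_getD_set]
          split
          · rename_i hcond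
            rw [← hcond.1]
            calc min (pvGetI s u) e.2 ≤ min (q.getD u.toNat 0) e.2 :=
                min_le_min hbu (le_refl e.2)
              _ ≤ q.getD e.1.toNat 0 := hq u hu'.1 (by omega) e he
          · exact hs' j
        · exact hs' j
      exact pv_foldl_pres (fun (s' : List Int) => ∀ j, s'.getD j 0 ≤ q.getD j 0) _ _ _ hstep2 hs
  exact pv_foldl_pres (fun (s : List Int) => ∀ j, s.getD j 0 ≤ q.getD j 0) _ _ _ hstep hle

theorem pvLoopB_succ (n : Int) (adj : List (Int × List (Int × Int))) (f : Nat) (b : List Int) :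
    pvLoopB n adj (f + 1) b =
      if pvRoundB n adj b = b then b else pvLoopB n adj f (pvRoundB n adj b) := rfl

theorem pvLoopB_le (n : Int) (adj : List (Int × List (Int × Int))) (q : List Int)
    (hq : pvClosed n adj q)
    (htgt : ∀ u : Int, 1 ≤ u → u ≤ n → ∀ e ∈ pvLookup adj u, 1 ≤ e.1 ∧ e.1 ≤ n) :
    ∀ (fuel : Nat) (b : List Int), (∀ j, b.getD j 0 ≤ q.getD j 0) →
    ∀ j, (pvLoopB n adj fuel b).getD j 0 ≤ q.getD j 0 := by
  intro fuel
  induction fuel with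
  | zero => intro b hb; exact hb
  | succ f ih =>
    intro b hb
    rw [pvLoopB_succ]
    split
    · exact hb
    · exact ih _ (pvRoundB_le n adj q hq htgt b hb)


-- ---------- A: invariant preservation and termination ----------

theorem pvRelaxA_inv (n : Int) (adj : List (Int × List (Int × Int))) (val u : Int)
    (hu : 1 ≤ u ∧ u ≤ n) (hval : val ∈ pvCaps adj) :
    ∀ (edges : List (Int × Int)) (st : List Int × List (Int × Int)),
    (∀ e ∈ edges, (1 ≤ e.1 ∧ e.1 ≤ n) ∧ e.2 ∈ pvCaps adj) →
    st.1.length = (n + 1).toNat →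
    (∀ j, -1 ≤ st.1.getD j 0) →
    (∀ j, j < (n + 1).toNat → st.1.getD j 0 = -1 ∨ st.1.getD j 0 ∈ pvCaps adj) →
    val ≤ st.1.getD u.toNat 0 →
    (∀ e ∈ st.2, (1 ≤ e.2 ∧ e.2 ≤ n) ∧ -e.1 ≤ st.1.getD e.2.toNat 0 ∧ -e.1 ∈ pvCaps adj) →
    (∀ w : Int, 1 ≤ w → w ≤ n → w.toNat ≠ u.toNat → pvNode adj st.1 st.2 w) →
    (edges.foldl (pvStepA val) st).1.length = (n + 1).toNat
    ∧ (∀ j, st.1.getD j 0 ≤ (edges.foldl (pvStepA val) st).1.getD j 0)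
    ∧ (∀ j, -1 ≤ (edges.foldl (pvStepA val) st).1.getD j 0)
    ∧ (∀ j, j < (n + 1).toNat → (edges.foldl (pvStepA val) st).1.getD j 0 = -1
        ∨ (edges.foldl (pvStepA val) st).1.getD j 0 ∈ pvCaps adj)
    ∧ (edges.foldl (pvStepA val) st).1.getD u.toNat 0 = st.1.getD u.toNat 0
    ∧ (∀ e ∈ edges, min val e.2 ≤ (edges.foldl (pvStepA val) st).1.getD e.1.toNat 0)
    ∧ (∀ e ∈ (edges.foldl (pvStepA val) st).2, (1 ≤ e.2 ∧ e.2 ≤ n)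
        ∧ -e.1 ≤ (edges.foldl (pvStepA val) st).1.getD e.2.toNat 0 ∧ -e.1 ∈ pvCaps adj)
    ∧ (∀ w : Int, 1 ≤ w → w ≤ n → w.toNat ≠ u.toNat →
        pvNode adj (edges.foldl (pvStepA val) st).1 (edges.foldl (pvStepA val) st).2 w)
    ∧ (edges.foldl (pvStepA val) st).2.length
        + pvSum (pvCaps adj) ((n + 1).toNat) (edges.foldl (pvStepA val) st).1
      ≤ st.2.length + pvSum (pvCaps adj) ((n + 1).toNat) st.1 := by
  intro edges
  induction edges with
  | nil =>
    intro st _ hlen hge hvals hvalu hheap hnode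
    exact ⟨hlen, fun j => le_refl _, hge, hvals, rfl, by simp, hheap, hnode, le_refl _⟩
  | cons e t ih =>
    intro st hedges hlen hge hvals hvalu hheap hnode
    obtain ⟨⟨he1, he2⟩, hec⟩ := hedges e List.mem_cons_self
    have htl : ∀ e' ∈ t, (1 ≤ e'.1 ∧ e'.1 ≤ n) ∧ e'.2 ∈ pvCaps adj :=
      fun e' he' => hedges e' (List.mem_cons_of_mem _ he')
    rw [List.foldl_cons, pvStepA_eq val st e (by omega)]
    split
    · rename_i hup
      set v := e.1.toNat with hv
      set cand := min val e.2 with hcand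
      have hvlt : v < st.1.length := by rw [hlen]; omega
      have hcandmem : cand ∈ pvCaps adj := by
        rcases min_choice val e.2 with h | h
        · rw [hcand, h]; exact hval
        · rw [hcand, h]; exact hec
      have hcandge : -1 < cand := lt_of_le_of_lt (hge v) hup
      have hvu : v ≠ u.toNat := by
        intro hvu
        rw [hvu] at hup
        have : cand ≤ val := min_le_left _ _
        omega
      have hlen' : (st.1.set v cand).length = (n + 1).toNat := by simpa using hlen
      have hmono1 : ∀ j, st.1.getD j 0 ≤ (st.1.set v cand).getD j 0 := by
        intro j
        rw [pv_getD_set]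
        split
        · rename_i hc; rw [← hc.1]; omega
        · exact le_refl _
      have hge' : ∀ j, -1 ≤ (st.1.set v cand).getD j 0 :=
        fun j => le_trans (hge j) (hmono1 j)
      have hvals' : ∀ j, j < (n + 1).toNat →
          (st.1.set v cand).getD j 0 = -1 ∨ (st.1.set v cand).getD j 0 ∈ pvCaps adj := by
        intro j hj
        rw [pv_getD_set]
        split
        · right; exact hcandmem
        · exact hvals j hj
      have hsetu : (st.1.set v cand).getD u.toNat 0 = st.1.getD u.toNat 0 := by
        rw [pv_getD_set]
        split
        · rename_i hc; exact absurd hc.1 hvu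
        · rfl
      have hvalu' : val ≤ (st.1.set v cand).getD u.toNat 0 := by rw [hsetu]; exact hvalu
      have hheap' : ∀ e' ∈ st.2 ++ [(-cand, e.1)], (1 ≤ e'.2 ∧ e'.2 ≤ n)
          ∧ -e'.1 ≤ (st.1.set v cand).getD e'.2.toNat 0 ∧ -e'.1 ∈ pvCaps adj := by
        intro e' he'
        rcases List.mem_append.1 he' with h' | h'
        · obtain ⟨hbnd, hb, hm⟩ := hheap e' h'
          exact ⟨hbnd, le_trans hb (hmono1 _), hm⟩
        · simp only [List.mem_singleton] at h'
          subst h'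
          refine ⟨⟨he1, he2⟩, ?_, by simpa using hcandmem⟩
          simp only [neg_neg]
          exact le_of_eq (pv_getD_set_self st.1 v cand hvlt).symm
      have hnode' : ∀ w : Int, 1 ≤ w → w ≤ n → w.toNat ≠ u.toNat →
          pvNode adj (st.1.set v cand) (st.2 ++ [(-cand, e.1)]) w := by
        intro w hw1 hw2 hwu
        by_cases hwv : w.toNat = v
        · have hwe : w = e.1 := by omega
          right; left
          refine ⟨(-cand, e.1), List.mem_append_right _ (List.mem_singleton.2 rfl), by simp [hwe], ?_⟩
          simp only [neg_neg]
          rw [show w.toNat = v from hwv]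
          exact (pv_getD_set_self st.1 v cand hvlt).symm
        · rcases hnode w hw1 hw2 hwu with d1 | ⟨e', he', he'2, he'v⟩ | d3
          · left
            rw [pv_getD_set]
            split
            · rename_i hc; exact absurd hc.1.symm hwv
            · exact d1
          · right; left
            refine ⟨e', List.mem_append_left _ he', he'2, ?_⟩
            rw [pv_getD_set]
            split
            · rename_i hc; exact absurd hc.1.symm hwv
            · exact he'v
          · right; right
            intro e'' he''
            have hlhs : (st.1.set v cand).getD w.toNat 0 = st.1.getD w.toNat 0 := by
              rw [pv_getD_set]
              split
              · rename_i hc; exact absurd hc.1.symm hwv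
              · rfl
            rw [hlhs, pv_getD_set]
            split
            · rename_i hc
              have := d3 e'' he''
              rw [← hc.1] at this
              omega
            · exact d3 e'' he''
      obtain ⟨c1, c2, c3, c4, c5, c6, c7, c8, c9⟩ :=
        ih (st.1.set v cand, st.2 ++ [(-cand, e.1)]) htl hlen' hge' hvals' hvalu' hheap' hnode'
      have hsum : pvSum (pvCaps adj) ((n + 1).toNat) (st.1.set v cand)
          < pvSum (pvCaps adj) ((n + 1).toNat) st.1 := by
        apply pvSum_strict (pvCaps adj) ((n + 1).toNat) hmono1 v (by omega)
        · rw [pv_getD_set_self st.1 v cand hvlt]; exact hup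
        · rw [pv_getD_set_self st.1 v cand hvlt]; exact hcandmem
      refine ⟨c1, fun j => le_trans (hmono1 j) (c2 j), c3, c4, ?_, ?_, c7, c8, ?_⟩
      · rw [c5, hsetu]
      · intro e' he'
        rcases List.mem_cons.1 he' with h' | h'
        · rw [h']
          have hvv := pv_getD_set_self st.1 v cand hvlt
          have h2 := c2 v
          rw [hvv] at h2
          exact h2
        · exact c6 e' h'
      · simp only [List.length_append, List.length_singleton] at c9 ⊢
        omega
    · rename_i hup
      obtain ⟨c1, c2, c3, c4, c5, c6, c7, c8, c9⟩ :=
        ih st htl hlen hge hvals hvalu hheap hnode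
      refine ⟨c1, c2, c3, c4, c5, ?_, c7, c8, c9⟩
      intro e' he'
      rcases List.mem_cons.1 he' with h' | h'
      · rw [h']
        exact le_trans (not_lt.1 hup) (c2 e.1.toNat)
      · exact c6 e' h'


theorem pvLoopA_main (n : Int) (adj : List (Int × List (Int × Int)))
    (htgt : ∀ u : Int, 1 ≤ u → u ≤ n → ∀ e ∈ pvLookup adj u, 1 ≤ e.1 ∧ e.1 ≤ n)
    (hcap : ∀ u : Int, ∀ e ∈ pvLookup adj u, e.2 ∈ pvCaps adj) :
    ∀ (fuel : Nat) (best : List Int) (heap : List (Int × Int)),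
    best.length = (n + 1).toNat →
    (∀ j, -1 ≤ best.getD j 0) →
    (∀ j, j < (n + 1).toNat → best.getD j 0 = -1 ∨ best.getD j 0 ∈ pvCaps adj) →
    (∀ e ∈ heap, (1 ≤ e.2 ∧ e.2 ≤ n) ∧ -e.1 ≤ best.getD e.2.toNat 0 ∧ -e.1 ∈ pvCaps adj) →
    (∀ w : Int, 1 ≤ w → w ≤ n → pvNode adj best heap w) →
    heap.length + pvSum (pvCaps adj) ((n + 1).toNat) best < fuel →
    (pvLoopA adj fuel best heap).length = (n + 1).toNat
    ∧ (∀ j, best.getD j 0 ≤ (pvLoopA adj fuel best heap).getD j 0)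
    ∧ (∀ j, -1 ≤ (pvLoopA adj fuel best heap).getD j 0)
    ∧ pvClosed n adj (pvLoopA adj fuel best heap) := by
  intro fuel
  induction fuel with
  | zero => intro best heap _ _ _ _ _ hphi; omega
  | succ f ih =>
    intro best heap hlen hge hvals hheap hnode hphi
    rw [pvLoopA]
    cases hpop : pvPopMin heap with
    | none =>
      have hnil : heap = [] := (pvPopMin_none_iff heap).1 hpop
      subst hnil
      refine ⟨hlen, fun j => le_refl _, hge, ?_⟩
      intro w hw1 hw2 e he
      rcases hnode w hw1 hw2 with d1 | ⟨e', he', _⟩ | d3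
      · rw [d1]
        exact le_trans (min_le_left _ _) (by have := hge e.1.toNat; omega)
      · simp at he'
      · exact d3 e he
    | some p =>
      obtain ⟨m, rest⟩ := p
      have hmem := pvPopMin_mem heap m rest hpop
      have hlenh := pvPopMin_length heap m rest hpop
      obtain ⟨⟨hm1, hm2⟩, hmb, hmS⟩ := hheap m (hmem m List.mem_cons_self)
      have hrest : ∀ e ∈ rest, (1 ≤ e.2 ∧ e.2 ≤ n) ∧ -e.1 ≤ best.getD e.2.toNat 0
          ∧ -e.1 ∈ pvCaps adj :=
        fun e he => hheap e (hmem e (List.mem_cons_of_mem _ he))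
      simp only []
      split
      · rename_i hskip
        rw [pvGetI_eq best m.2 (by omega)] at hskip
        have hnode' : ∀ w : Int, 1 ≤ w → w ≤ n → pvNode adj best rest w := by
          intro w hw1 hw2
          rcases hnode w hw1 hw2 with d1 | ⟨e', he', he'2, he'v⟩ | d3
          · exact Or.inl d1
          · rcases List.mem_cons.1 ((pvPopMin_perm heap m rest hpop).subset he') with h' | h'
            · exfalso
              rw [h'] at he'2 he'v
              rw [← he'2] at he'v
              omega
            · exact Or.inr (Or.inl ⟨e', h', he'2, he'v⟩)
          · exact Or.inr (Or.inr d3)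
        exact ih best rest hlen hge hvals hrest hnode' (by omega)
      · rename_i hskip
        rw [pvGetI_eq best m.2 (by omega)] at hskip
        have hvalu : -m.1 = best.getD m.2.toNat 0 := by omega
        have hedges : ∀ e ∈ pvLookup adj m.2, (1 ≤ e.1 ∧ e.1 ≤ n) ∧ e.2 ∈ pvCaps adj :=
          fun e he => ⟨htgt m.2 hm1 hm2 e he, hcap m.2 e he⟩
        have hnode' : ∀ w : Int, 1 ≤ w → w ≤ n → w.toNat ≠ m.2.toNat →
            pvNode adj best rest w := by
          intro w hw1 hw2 hwm
          rcases hnode w hw1 hw2 with d1 | ⟨e', he', he'2, he'v⟩ | d3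
          · exact Or.inl d1
          · rcases List.mem_cons.1 ((pvPopMin_perm heap m rest hpop).subset he') with h' | h'
            · exfalso
              rw [h'] at he'2
              rw [← he'2] at hwm
              exact hwm rfl
            · exact Or.inr (Or.inl ⟨e', h', he'2, he'v⟩)
          · exact Or.inr (Or.inr d3)
        obtain ⟨c1, c2, c3, c4, c5, c6, c7, c8, c9⟩ :=
          pvRelaxA_inv n adj (-m.1) m.2 ⟨hm1, hm2⟩ hmS (pvLookup adj m.2) (best, rest)
            hedges hlen hge hvals (le_of_eq hvalu) hrest hnode'
        simp only [] at c2 c5 c9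
        have hnode'' : ∀ w : Int, 1 ≤ w → w ≤ n →
            pvNode adj (((pvLookup adj m.2).foldl (pvStepA (-m.1)) (best, rest)).1)
              (((pvLookup adj m.2).foldl (pvStepA (-m.1)) (best, rest)).2) w := by
          intro w hw1 hw2
          by_cases hwm : w.toNat = m.2.toNat
          · have hwm' : w = m.2 := by omega
            subst hwm'
            right; right
            intro e he
            have h1 := c6 e he
            rw [c5, ← hvalu]
            exact h1
          · exact c8 w hw1 hw2 hwm
        obtain ⟨d1, d2, d3, d4⟩ := ih _ _ c1 c3 c4 c7 hnode'' (by omega)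
        exact ⟨d1, fun j => le_trans (c2 j) (d2 j), d3, d4⟩


-- ---------- B: invariants, fixpoint detection, termination ----------

theorem pvStepB_ple (bu : Int) (b : List Int) (e : Int × Int) (h1 : 0 ≤ e.1) :
    PLe b (pvStepB bu b e) := by
  rw [pvStepB_eq bu b e h1]
  split
  · rename_i hup
    refine ⟨(List.length_set ..).symm, ?_⟩
    intro j
    rw [pv_getD_set]
    split
    · rename_i hc; rw [← hc.1]; omega
    · exact le_refl _
  · exact PLe.refl' b

theorem pv_foldl_ple {β : Type} (l : List β) (g : List Int → β → List Int) (s : List Int)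
    (hg : ∀ s' x, x ∈ l → PLe s' (g s' x)) : PLe s (l.foldl g s) := by
  apply pv_foldl_pres (fun s' => PLe s s') l g s
  · intro s' x hx hP
    exact hP.trans' (hg s' x hx)
  · exact PLe.refl' s

theorem pv_foldl_fix {β : Type} (l : List β) (g : List Int → β → List Int) (s : List Int)
    (hg : ∀ s' x, x ∈ l → PLe s' (g s' x)) (hfix : l.foldl g s = s) : ∀ x ∈ l, g s x = s := by
  induction l with
  | nil => intro x hx; simp at hx
  | cons x t ih =>
    rw [List.foldl_cons] at hfix
    have h1 : PLe s (g s x) := hg s x List.mem_cons_self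
    have h2 : PLe (g s x) (t.foldl g (g s x)) :=
      pv_foldl_ple t g (g s x) (fun s' y hy => hg s' y (List.mem_cons_of_mem _ hy))
    rw [hfix] at h2
    have heq : g s x = s := PLe.antisymm' h2 h1
    rw [heq] at hfix
    intro y hy
    rcases List.mem_cons.1 hy with h' | h'
    · rw [h']; exact heq
    · exact ih (fun s' z hz => hg s' z (List.mem_cons_of_mem _ hz)) hfix y h'

def pvInvB (n : Int) (adj : List (Int × List (Int × Int))) (s : List Int) : Prop :=
  s.length = (n + 1).toNat ∧ (∀ j, -1 ≤ s.getD j 0)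
  ∧ (∀ j, j < (n + 1).toNat → s.getD j 0 = -1 ∨ s.getD j 0 ∈ pvCaps adj)

theorem pvStepB_inv (n : Int) (adj : List (Int × List (Int × Int)))
    (htgt : ∀ u : Int, 1 ≤ u → u ≤ n → ∀ e ∈ pvLookup adj u, 1 ≤ e.1 ∧ e.1 ≤ n)
    (hcap : ∀ u : Int, ∀ e ∈ pvLookup adj u, e.2 ∈ pvCaps adj)
    (u : Int) (hu : 1 ≤ u ∧ u ≤ n) (bu : Int) (hbu : bu ∈ pvCaps adj)
    (s' : List Int) (e : Int × Int) (he : e ∈ pvLookup adj u)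
    (hP : pvInvB n adj s') : pvInvB n adj (pvStepB bu s' e) := by
  obtain ⟨hl, hg', hv⟩ := hP
  obtain ⟨he1, he2⟩ := htgt u hu.1 hu.2 e he
  rw [pvStepB_eq bu s' e (by omega)]
  split
  · rename_i hup
    have hcm : min bu e.2 ∈ pvCaps adj := by
      rcases min_choice bu e.2 with h | h
      · rw [h]; exact hbu
      · rw [h]; exact hcap u e he
    refine ⟨by simpa using hl, ?_, ?_⟩
    · intro j
      rw [pv_getD_set]
      split
      · rename_i hc
        have := hg' e.1.toNat
        omega
      · exact hg' j
    · intro j hj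
      rw [pv_getD_set]
      split
      · exact Or.inr hcm
      · exact hv j hj
  · exact ⟨hl, hg', hv⟩

theorem pvRoundB_inv (n : Int) (adj : List (Int × List (Int × Int)))
    (htgt : ∀ u : Int, 1 ≤ u → u ≤ n → ∀ e ∈ pvLookup adj u, 1 ≤ e.1 ∧ e.1 ≤ n)
    (hcap : ∀ u : Int, ∀ e ∈ pvLookup adj u, e.2 ∈ pvCaps adj)
    (b : List Int) (hlen : b.length = (n + 1).toNat)
    (hge : ∀ j, -1 ≤ b.getD j 0)
    (hvals : ∀ j, j < (n + 1).toNat → b.getD j 0 = -1 ∨ b.getD j 0 ∈ pvCaps adj) :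
    (pvRoundB n adj b).length = (n + 1).toNat
    ∧ PLe b (pvRoundB n adj b)
    ∧ (∀ j, -1 ≤ (pvRoundB n adj b).getD j 0)
    ∧ (∀ j, j < (n + 1).toNat →
        (pvRoundB n adj b).getD j 0 = -1 ∨ (pvRoundB n adj b).getD j 0 ∈ pvCaps adj) := by
  have main : pvInvB n adj (pvRoundB n adj b) := by
    have hstep : ∀ (s : List Int) (u : Int), u ∈ PySem.List.pyRange 1 (n + 1) 1 →
        pvInvB n adj s →
        pvInvB n adj ((fun (b : List Int) (u : Int) =>
          let bu := pvGetI b u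
          if bu = -1 then b
          else (pvLookup adj u).foldl (fun b e => pvStepB bu b e) b) s u) := by
      intro s u hu hP
      have hu' : 1 ≤ u ∧ u < n + 1 := (PySem.List.mem_pyRange_one).1 hu
      simp only []
      split
      · exact hP
      · rename_i hne
        have hbu : pvGetI s u ∈ pvCaps adj := by
          have hu2 : u.toNat < (n + 1).toNat := by omega
          rw [pvGetI_eq s u (by omega)] at hne ⊢
          rcases hP.2.2 u.toNat hu2 with h' | h'
          · exact absurd h' hne
          · exact h'
        have hstep2 : ∀ (s' : List Int) (e : Int × Int), e ∈ pvLookup adj u →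
            pvInvB n adj s' → pvInvB n adj (pvStepB (pvGetI s u) s' e) :=
          fun s' e he hP' =>
            pvStepB_inv n adj htgt hcap u ⟨hu'.1, by omega⟩ (pvGetI s u) hbu s' e he hP'
        exact pv_foldl_pres (pvInvB n adj) _ _ _ hstep2 hP
    unfold pvRoundB
    exact pv_foldl_pres (pvInvB n adj) _ _ _ hstep ⟨hlen, hge, hvals⟩
  have hple : PLe b (pvRoundB n adj b) := by
    unfold pvRoundB
    apply pv_foldl_ple
    intro s' u hu
    have hu' : 1 ≤ u ∧ u < n + 1 := (PySem.List.mem_pyRange_one).1 hu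
    simp only []
    split
    · exact PLe.refl' s'
    · apply pv_foldl_ple
      intro s'' e he
      exact pvStepB_ple _ s'' e (by have := (htgt u hu'.1 (by omega) e he).1; omega)
  exact ⟨main.1, hple, main.2.1, main.2.2⟩

theorem pvRoundB_fix_closed (n : Int) (adj : List (Int × List (Int × Int)))
    (htgt : ∀ u : Int, 1 ≤ u → u ≤ n → ∀ e ∈ pvLookup adj u, 1 ≤ e.1 ∧ e.1 ≤ n)
    (b : List Int) (hlen : b.length = (n + 1).toNat)
    (hge : ∀ j, -1 ≤ b.getD j 0)
    (hfix : pvRoundB n adj b = b) : pvClosed n adj b := by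
  intro u hu1 hu2 e he
  have humem : u ∈ PySem.List.pyRange 1 (n + 1) 1 :=
    (PySem.List.mem_pyRange_one).2 ⟨hu1, by omega⟩
  have hg_outer : ∀ (s' : List Int) (u' : Int), u' ∈ PySem.List.pyRange 1 (n + 1) 1 →
      PLe s' ((fun (b : List Int) (u' : Int) =>
        let bu := pvGetI b u'
        if bu = -1 then b
        else (pvLookup adj u').foldl (fun b e => pvStepB bu b e) b) s' u') := by
    intro s' u' hu'
    have hb' : 1 ≤ u' ∧ u' < n + 1 := (PySem.List.mem_pyRange_one).1 hu'
    simp only []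
    split
    · exact PLe.refl' s'
    · apply pv_foldl_ple
      intro s'' e' he'
      exact pvStepB_ple _ s'' e' (by have := (htgt u' hb'.1 (by omega) e' he').1; omega)
  have h_out := pv_foldl_fix _ _ b hg_outer hfix u humem
  simp only [] at h_out
  by_cases hbu : pvGetI b u = -1
  · -- unreached node: min(-1, c) ≤ b[v] holds since every entry is ≥ -1
    rw [pvGetI_eq b u (by omega)] at hbu
    rw [hbu]
    exact le_trans (min_le_left _ _) (by have := hge e.1.toNat; omega)
  · rw [if_neg hbu] at h_out
    have hg_inner : ∀ (s' : List Int) (e' : Int × Int), e' ∈ pvLookup adj u →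
        PLe s' (pvStepB (pvGetI b u) s' e') := by
      intro s' e' he'
      exact pvStepB_ple _ s' e' (by have := (htgt u hu1 hu2 e' he').1; omega)
    have h_in := pv_foldl_fix _ _ b hg_inner h_out e he
    rw [pvStepB_eq (pvGetI b u) b e (by have := (htgt u hu1 hu2 e he).1; omega)] at h_in
    rw [pvGetI_eq b u (by omega)] at h_in
    by_cases hupd : b.getD e.1.toNat 0 < min (b.getD u.toNat 0) e.2
    · exfalso
      rw [if_pos hupd] at h_in
      have hlt : e.1.toNat < b.length := by
        have := (htgt u hu1 hu2 e he).2
        omega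
      have := pv_getD_set_self b e.1.toNat (min (b.getD u.toNat 0) e.2) hlt
      rw [h_in] at this
      omega
    · exact not_lt.1 hupd

theorem pvLoopB_main (n : Int) (adj : List (Int × List (Int × Int)))
    (htgt : ∀ u : Int, 1 ≤ u → u ≤ n → ∀ e ∈ pvLookup adj u, 1 ≤ e.1 ∧ e.1 ≤ n)
    (hcap : ∀ u : Int, ∀ e ∈ pvLookup adj u, e.2 ∈ pvCaps adj) :
    ∀ (fuel : Nat) (b : List Int),
    b.length = (n + 1).toNat →
    (∀ j, -1 ≤ b.getD j 0) →
    (∀ j, j < (n + 1).toNat → b.getD j 0 = -1 ∨ b.getD j 0 ∈ pvCaps adj) →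
    pvSum (pvCaps adj) ((n + 1).toNat) b < fuel →
    (pvLoopB n adj fuel b).length = (n + 1).toNat
    ∧ (∀ j, b.getD j 0 ≤ (pvLoopB n adj fuel b).getD j 0)
    ∧ (∀ j, -1 ≤ (pvLoopB n adj fuel b).getD j 0)
    ∧ pvClosed n adj (pvLoopB n adj fuel b) := by
  intro fuel
  induction fuel with
  | zero => intro b _ _ _ hphi; omega
  | succ f ih =>
    intro b hlen hge hvals hphi
    rw [pvLoopB_succ]
    split
    · rename_i hfix
      exact ⟨hlen, fun j => le_refl _, hge,
        pvRoundB_fix_closed n adj htgt b hlen hge hfix⟩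
    · rename_i hne
      obtain ⟨hl', hple, hge', hvals'⟩ := pvRoundB_inv n adj htgt hcap b hlen hge hvals
      have hstrict : ∃ j, j < (n + 1).toNat ∧ b.getD j 0 < (pvRoundB n adj b).getD j 0 := by
        by_contra hcon
        have hcon' : ∀ j, j < (n + 1).toNat →
            ¬ (b.getD j 0 < (pvRoundB n adj b).getD j 0) :=
          fun j hj hlt => hcon ⟨j, hj, hlt⟩
        apply hne
        apply List.ext_getElem (by omega)
        intro i h1 h2
        have hle := hple.2 i
        have hge2 := hcon' i (by omega)
        rw [pv_getD_eq_getElem _ _ h1, pv_getD_eq_getElem _ _ h2] at hle hge2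
        omega
      obtain ⟨j0, hj0, hj0lt⟩ := hstrict
      have hmemS : (pvRoundB n adj b).getD j0 0 ∈ pvCaps adj := by
        rcases hvals' j0 hj0 with h' | h'
        · exfalso; have := hge j0; omega
        · exact h'
      have hsum : pvSum (pvCaps adj) ((n + 1).toNat) (pvRoundB n adj b)
          < pvSum (pvCaps adj) ((n + 1).toNat) b :=
        pvSum_strict (pvCaps adj) _ hple.2 j0 hj0 hj0lt hmemS
      obtain ⟨d1, d2, d3, d4⟩ := ih (pvRoundB n adj b) hl' hge' hvals' (by omega)
      exact ⟨d1, fun j => le_trans (hple.2 j) (d2 j), d3, d4⟩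


-- ---------- aggregation: A's early-return loop vs B's min() ----------

def pvAggList : List Int → Int → Int
  | [], ans => ans
  | x :: r, ans => if x = -1 then 0 else pvAggList r (if x < ans then x else ans)

theorem pvAggA_eq (b : List Int) :
    ∀ (idxs : List Int) (ans : Int),
    pvAggA b idxs ans = pvAggList (idxs.map (fun i => PySem.List.pyGetD b i 0)) ans := by
  intro idxs
  induction idxs with
  | nil => intro ans; simp [pvAggA, pvAggList]
  | cons i r ih =>
    intro ans
    simp only [pvAggA, pvAggList, List.map_cons, pvGetI]
    split
    · rfl
    · exact ih _

theorem pv_min_ite2 (a x : Int) : (if x < a then x else a) = min a x := by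
  split_ifs <;> omega

theorem pv_foldl_min_neg1 : ∀ (l : List Int), (∀ x ∈ l, -1 ≤ x) → l.foldl min (-1) = -1 := by
  intro l
  induction l with
  | nil => intro _; rfl
  | cons x t ih =>
    intro h
    rw [List.foldl_cons, min_eq_left (h x List.mem_cons_self)]
    exact ih (fun y hy => h y (List.mem_cons_of_mem _ hy))

theorem pvAggMin : ∀ (l : List Int) (ans : Int), -1 ≤ ans → (∀ x ∈ l, -1 ≤ x) →
    (if ans = -1 then (0 : Int) else pvAggList l ans)
      = (if l.foldl min ans = -1 then 0 else l.foldl min ans) := by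
  intro l
  induction l with
  | nil => intro ans _ _; rfl
  | cons x t ih =>
    intro ans hans hxl
    have hx : -1 ≤ x := hxl x List.mem_cons_self
    have hxt : ∀ y ∈ t, -1 ≤ y := fun y hy => hxl y (List.mem_cons_of_mem _ hy)
    rw [List.foldl_cons]
    by_cases hans1 : ans = -1
    · rw [if_pos hans1]
      have hm : min ans x = -1 := by rw [hans1]; exact min_eq_left hx
      rw [hm, pv_foldl_min_neg1 t hxt]
      rfl
    · rw [if_neg hans1]
      by_cases hx1 : x = -1
      · have hL : pvAggList (x :: t) ans = 0 := by simp [pvAggList, hx1]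
        have hm : min ans x = -1 := by rw [hx1]; exact min_eq_right hans
        rw [hL, hm, pv_foldl_min_neg1 t hxt]
        rfl
      · have hL : pvAggList (x :: t) ans = pvAggList t (min ans x) := by
          simp only [pvAggList, if_neg hx1, pv_min_ite2]
        have hmn : ¬ (min ans x = -1) := by
          rcases min_choice ans x with h | h <;> omega
        have hih := ih (min ans x) (le_min hans hx) hxt
        rw [if_neg hmn] at hih
        rw [hL, hih]

theorem pv_witness_ok :
    Dom_widest_path_min_over_all pvWitness_widest_path_min_over_all.1 pvWitness_widest_path_min_over_all.2 ∧
    Pre_widest_path_min_over_all pvWitness_widest_path_min_over_all.1 pvWitness_widest_path_min_over_all.2 := by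
  constructor <;> decide

theorem pv_main (n : Int) (adj : List (Int × List (Int × Int)))
    (hpre : Pre_widest_path_min_over_all n adj) :
    widest_path_min_over_all n adj = widest_path_min_over_all_alt n adj := by
  rcases hpre with h1 | ⟨hn2, hall⟩
  · subst h1
    simp [widest_path_min_over_all, widest_path_min_over_all_alt]
  · have hne1 : ¬ (n = 1) := by omega
    rw [Bool.and_eq_true] at hall
    obtain ⟨_hkey1, hedges⟩ := hall
    have hedge' : ∀ p ∈ adj, 1 ≤ p.1 → p.1 ≤ n → ∀ e ∈ p.2, 1 ≤ e.1 ∧ e.1 ≤ n := by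
      intro p hp hp1 hp2 e he
      have h1 := List.all_eq_true.1 hedges p hp
      rw [Bool.or_eq_true, Bool.not_eq_true'] at h1
      rcases h1 with h1 | h1
      · rw [Bool.and_eq_false_iff] at h1
        rcases h1 with h1 | h1 <;> simp at h1 <;> omega
      · have h2 := List.all_eq_true.1 h1 e he
        rw [Bool.and_eq_true, Bool.and_eq_true] at h2
        refine ⟨by simpa using h2.1.1, by simpa using h2.1.2⟩
    have htgt : ∀ u : Int, 1 ≤ u → u ≤ n → ∀ e ∈ pvLookup adj u, 1 ≤ e.1 ∧ e.1 ≤ n := by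
      intro u hu1 hu2 e he
      rcases pvLookup_cases adj u with h | ⟨p, hp, hp1, hp2⟩
      · rw [h] at he; simp at he
      · rw [← hp2] at he
        exact hedge' p hp (by omega) (by omega) e he
    have hcap : ∀ u : Int, ∀ e ∈ pvLookup adj u, e.2 ∈ pvCaps adj :=
      fun u e he => pvCaps_mem adj u e he
    -- the common initial array
    have hb0' : pvSetI (List.replicate (n + 1).toNat (-1)) 1 1000000000000000000
        = (List.replicate (n + 1).toNat (-1 : Int)).set 1 1000000000000000000 :=
      pvSetI_eq _ _ _ (by omega)
    set b0 : List Int :=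
      (List.replicate (n + 1).toNat (-1 : Int)).set 1 1000000000000000000 with hb0
    have hLge : 3 ≤ (n + 1).toNat := by omega
    have hlen0 : b0.length = (n + 1).toNat := by simp [hb0]
    have hrep : ∀ j : Nat, (List.replicate (n + 1).toNat (-1 : Int)).getD j 0
        = if j < (n + 1).toNat then -1 else 0 := by
      intro j
      rw [List.getD, List.getElem?_replicate]
      split_ifs <;> rfl
    have hget01 : b0.getD 1 0 = 1000000000000000000 := by
      rw [hb0, pv_getD_set]
      rw [if_pos ⟨rfl, by simp; omega⟩]
    have hget0ne : ∀ j : Nat, j ≠ 1 → b0.getD j 0 = if j < (n + 1).toNat then -1 else 0 := by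
      intro j hj
      rw [hb0, pv_getD_set, if_neg (by intro hc; exact hj hc.1.symm), hrep]
    have hge0 : ∀ j, -1 ≤ b0.getD j 0 := by
      intro j
      by_cases hj : j = 1
      · rw [hj, hget01]; omega
      · rw [hget0ne j hj]; split_ifs <;> omega
    have hvals0 : ∀ j, j < (n + 1).toNat → b0.getD j 0 = -1 ∨ b0.getD j 0 ∈ pvCaps adj := by
      intro j hj
      by_cases hj1 : j = 1
      · right; rw [hj1, hget01]; exact pvCaps_inf adj
      · left; rw [hget0ne j hj1, if_pos hj]
    have hS1 : 1 ≤ (pvCaps adj).length := by simp [pvCaps]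
    have hphi : ∀ extra : Nat, extra ≤ 1 →
        extra + pvSum (pvCaps adj) ((n + 1).toNat) b0 < pvFuel n adj := by
      intro extra hextra
      have hsum0 := pvSum_le (pvCaps adj) ((n + 1).toNat) b0
      have hLle : (n + 1).toNat ≤ n.toNat + 1 := by omega
      have hmul : (n + 1).toNat * (pvCaps adj).length ≤ (n.toNat + 1) * (pvCaps adj).length :=
        Nat.mul_le_mul_right _ hLle
      have hexp : (n.toNat + 2) * (pvCaps adj).length
          = (n.toNat + 1) * (pvCaps adj).length + (pvCaps adj).length := by ring
      have hfuel : pvFuel n adj = (n.toNat + 2) * (pvCaps adj).length + 2 := rfl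
      omega
    -- the two computed arrays
    have hgi : pvGetI b0 1 = 1000000000000000000 := by
      rw [pvGetI_eq b0 1 (by omega)]
      exact hget01
    set rA : List Int := pvLoopA adj (pvFuel n adj) b0 [(-1000000000000000000, 1)] with hrA
    set rB : List Int := pvLoopB n adj (pvFuel n adj) b0 with hrB
    have hheap0 : ∀ e ∈ [((-1000000000000000000 : Int), (1 : Int))],
        (1 ≤ e.2 ∧ e.2 ≤ n) ∧ -e.1 ≤ b0.getD e.2.toNat 0 ∧ -e.1 ∈ pvCaps adj := by
      intro e he
      rw [List.mem_singleton] at he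
      subst he
      refine ⟨⟨le_refl _, by omega⟩, ?_, by simpa using pvCaps_inf adj⟩
      simp only [neg_neg]
      rw [show ((1 : Int)).toNat = 1 from rfl, hget01]
    have hnode0 : ∀ w : Int, 1 ≤ w → w ≤ n →
        pvNode adj b0 [((-1000000000000000000 : Int), (1 : Int))] w := by
      intro w hw1 hw2
      by_cases hw : w.toNat = 1
      · have hw' : w = 1 := by omega
        subst hw'
        right; left
        refine ⟨((-1000000000000000000 : Int), (1 : Int)), List.mem_singleton.2 rfl, rfl, ?_⟩
        simp only [neg_neg]
        rw [show ((1 : Int)).toNat = 1 from rfl, hget01]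
      · left
        rw [hget0ne w.toNat hw, if_pos (by omega)]
    obtain ⟨a1, a2, a3, a4⟩ := pvLoopA_main n adj htgt hcap (pvFuel n adj) b0
      [(-1000000000000000000, 1)] hlen0 hge0 hvals0 hheap0 hnode0
      (by simpa using hphi 1 (le_refl 1))
    obtain ⟨b1, b2, b3, b4⟩ := pvLoopB_main n adj htgt hcap (pvFuel n adj) b0
      hlen0 hge0 hvals0 (by have := hphi 0 (by omega); omega)
    rw [← hrA] at a1 a2 a3 a4
    rw [← hrB] at b1 b2 b3 b4
    have hABle : ∀ j, rA.getD j 0 ≤ rB.getD j 0 := by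
      rw [hrA]
      apply pvLoopA_le n adj rB b4 htgt (pvFuel n adj) b0 [(-1000000000000000000, 1)] hlen0
      · exact b2
      · intro e he
        rw [List.mem_singleton] at he
        subst he
        refine ⟨?_, le_refl _, by omega⟩
        simp only [neg_neg]
        rw [show ((1 : Int)).toNat = 1 from rfl, hget01]
    have hBAle : ∀ j, rB.getD j 0 ≤ rA.getD j 0 := by
      rw [hrB]
      exact pvLoopB_le n adj rA a4 htgt (pvFuel n adj) b0 a2
    have hAB : rA = rB := by
      apply List.ext_getElem (a1.trans b1.symm)
      intro i h1 h2
      have h3 := (hABle i).antisymm (hBAle i)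
      rwa [pv_getD_eq_getElem _ _ h1, pv_getD_eq_getElem _ _ h2] at h3
    -- unfold both ports to expressions in rA
    have h2lt : 2 < rA.length := by omega
    have hslice : PySem.List.slice rA (some 2) none = rA.drop 2 :=
      PySem.List.slice_from rA (by norm_num)
    have hg2 : pvGetI rA 2 = rA[2] := by
      rw [pvGetI_eq rA 2 (by omega)]
      exact pv_getD_eq_getElem rA 2 h2lt
    have hlenInt : PySem.List.len rA = n + 1 := by
      simp [PySem.List.len, a1]
      omega
    have hmap : (PySem.List.pyRange 3 (n + 1) 1).map (fun i => PySem.List.pyGetD rA i 0)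
        = rA.drop 3 := by
      rw [← hlenInt]
      exact PySem.List.map_pyGetD_pyRange rA 0 (by norm_num)
    have hansge : -1 ≤ rA[2] := by
      have := a3 2
      rwa [pv_getD_eq_getElem _ _ h2lt] at this
    have hdropge : ∀ x ∈ rA.drop 3, -1 ≤ x := by
      intro x hx
      obtain ⟨j, hj, hjx⟩ := pv_mem_getD rA x (List.mem_of_mem_drop hx)
      rw [← hjx]
      exact a3 j
    calc widest_path_min_over_all n adj
        = if pvGetI rA 2 = -1 then 0
          else pvAggA rA (PySem.List.pyRange 3 (n + 1) 1) (pvGetI rA 2) := by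
          rw [widest_path_min_over_all, if_neg hne1]
          simp only [hb0', hgi]
          rw [← hrA]
      _ = if rA[2] = -1 then 0 else pvAggList (rA.drop 3) rA[2] := by
          rw [hg2, pvAggA_eq, hmap]
      _ = if (rA.drop 3).foldl (min : Int → Int → Int) rA[2] = -1 then 0
          else (rA.drop 3).foldl (min : Int → Int → Int) rA[2] :=
          pvAggMin (rA.drop 3) rA[2] hansge hdropge
      _ = widest_path_min_over_all_alt n adj := by
          rw [widest_path_min_over_all_alt, if_neg hne1]
          simp only [hb0']
          rw [← hrB, ← hAB, hslice, List.drop_eq_getElem_cons h2lt, PySem.List.min?_id_cons]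

-- ===== VERDICT (by name: the statement is the Claim_ definition above) =====
theorem widest_path_min_over_all_spec : Claim_equal_widest_path_min_over_all := by
  intro n adj _hdom hpre
  exact pv_main n adj hpre
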